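-- pv_equiv track=rewrite | github.com/zeeshan4002911/DSA-reloaded | 1.data-structure/4.matrix/easy/rotate-matrix-clockwise-by-1.py | rotate_matrix_by_1
-- ===== SOURCE A (Python) =====
-- def rotate_matrix_by_1(mat, row, col):
--     row_start, row_end = 0, row - 1
--     col_start, col_end = 0, col - 1
--
--     while row_start < row_end and col_start < col_end:
--         # Boundary last clockwise element as prev_ele
--         prev_ele = mat[row_start + 1][col_start]
--
--         # Boundary top row iteration
--         for j in range(col_start, col_end + 1):
--             curr_ele = mat[row_start][j]
--             mat[row_start][j] = prev_ele
--             prev_ele = curr_ele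
--         row_start += 1
--
--         # Boundary right column iteration
--         for i in range(row_start, row_end + 1):
--             curr_ele = mat[i][col_end]
--             mat[i][col_end] = prev_ele
--             prev_ele = curr_ele
--         col_end -= 1
--
--         if col > 1:
--             # Boundary bottom row iteration
--             for j in range(col_end, col_start - 1, -1):
--                 curr_ele = mat[row_end][j]
--                 mat[row_end][j] = prev_ele
--                 prev_ele = curr_ele
--             row_end -= 1
--
--         if row > 1:
--             # Boundary left column iteration
--             for i in range(row_end, row_start - 1, -1):
--                 curr_ele = mat[i][col_start]
--                 mat[i][col_start] = prev_ele
--                 prev_ele = curr_ele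
--             col_start += 1
--
--     return mat
-- ===== SOURCE B (Python) =====
-- # Simpler decomposition: per layer, list the ring coordinates clockwise, read the
-- # values, rotate the list right by one, write it back.  Mutates mat in place like A.
-- def rotate_matrix_by_1(mat, row, col):
--     rs, re = 0, row - 1
--     cs, ce = 0, col - 1
--     while rs < re and cs < ce:
--         coords = ([(rs, j) for j in range(cs, ce + 1)]
--                   + [(i, ce) for i in range(rs + 1, re + 1)]
--                   + [(re, j) for j in range(ce - 1, cs - 1, -1)]
--                   + [(i, cs) for i in range(re - 1, rs, -1)])
--         vals = [mat[i][j] for (i, j) in coords]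
--         vals = [vals[-1]] + vals[:-1]
--         for (i, j), v in zip(coords, vals):
--             mat[i][j] = v
--         rs += 1; re -= 1; cs += 1; ce -= 1
--     return mat
-- ===== Notes on version B (the rewrite author's own statement) =====
-- stated objective: simpler
-- what changed: Instead of A's four in-place element-shifting boundary loops threading a prev_ele through the ring, B builds each layer's clockwise coordinate list, reads the values, rotates the value list right by one, and writes it back.
import Mathlib
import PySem

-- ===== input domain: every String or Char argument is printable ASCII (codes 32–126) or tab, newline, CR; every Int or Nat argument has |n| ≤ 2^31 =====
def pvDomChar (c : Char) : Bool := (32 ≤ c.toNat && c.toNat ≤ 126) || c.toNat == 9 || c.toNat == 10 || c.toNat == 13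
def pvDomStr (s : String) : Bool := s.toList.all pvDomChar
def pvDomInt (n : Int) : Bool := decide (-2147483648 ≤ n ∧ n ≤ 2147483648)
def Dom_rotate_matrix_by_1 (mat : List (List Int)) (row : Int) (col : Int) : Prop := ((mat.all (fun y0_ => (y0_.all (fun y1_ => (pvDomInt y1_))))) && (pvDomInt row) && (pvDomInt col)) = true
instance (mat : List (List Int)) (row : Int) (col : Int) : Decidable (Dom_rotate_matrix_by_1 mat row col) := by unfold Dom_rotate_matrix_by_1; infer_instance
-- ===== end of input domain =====

-- B rotates each ring by reading its clockwise coordinate list, rotating the value list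
-- right by one and writing it back, instead of A's four element-shifting boundary loops;
-- objective: simpler decomposition.  Both Pythons mutate mat in place identically; the
-- equivalence proved here is about the returned value.

-- ===== PORT A =====
-- mat[i][j] read/write; exact (via pyGetD/pySetD) wherever the Python does not raise —
-- the raising inputs are excluded by Pre_rotate_matrix_by_1.
def matGet (m : List (List Int)) (i j : Int) : Int :=
  PySem.List.pyGetD (PySem.List.pyGetD m i []) j 0

def matSet (m : List (List Int)) (i j : Int) (v : Int) : List (List Int) :=
  PySem.List.pySetD m i (PySem.List.pySetD (PySem.List.pyGetD m i []) j v)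

-- one step of A's boundary loops: curr = mat[p]; mat[p] = prev; prev = curr
def shiftCell (st : List (List Int) × Int) (p : Int × Int) : List (List Int) × Int :=
  (matSet st.1 p.1 p.2 st.2, matGet st.1 p.1 p.2)

-- A's `if col > 1` bottom-row block: returns (state, row_end after the block)
def bottomA (st : List (List Int) × Int) (col re cs ce1 : Int) : (List (List Int) × Int) × Int :=
  if 1 < col then
    ((PySem.List.pyRange ce1 (cs - 1) (-1)).foldl (fun s j => shiftCell s (re, j)) st, re - 1)
  else (st, re)

-- A's `if row > 1` left-column block: returns (state, col_start after the block)
def leftA (st : List (List Int) × Int) (row rs1 re1 cs : Int) : (List (List Int) × Int) × Int :=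
  if 1 < row then
    ((PySem.List.pyRange re1 (rs1 - 1) (-1)).foldl (fun s i => shiftCell s (i, cs)) st, cs + 1)
  else (st, cs)

theorem leftA_snd_ge (st : List (List Int) × Int) (row rs1 re1 cs : Int) :
    cs ≤ (leftA st row rs1 re1 cs).2 := by
  unfold leftA; split <;> simp

-- A's while loop
def rotA_loop (m : List (List Int)) (row col rs re cs ce : Int) : List (List Int) :=
  if h : rs < re ∧ cs < ce then
    let prev := matGet m (rs + 1) cs
    let st1 := (PySem.List.pyRange cs (ce + 1) 1).foldl (fun st j => shiftCell st (rs, j)) (m, prev)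
    let st2 := (PySem.List.pyRange (rs + 1) (re + 1) 1).foldl (fun st i => shiftCell st (i, ce)) st1
    let b := bottomA st2 col re cs (ce - 1)
    let l := leftA b.1 row (rs + 1) b.2 cs
    rotA_loop l.1.1 row col (rs + 1) b.2 l.2 (ce - 1)
  else m
termination_by (ce - cs).toNat
decreasing_by
  have := leftA_snd_ge (bottomA ((PySem.List.pyRange (rs + 1) (re + 1) 1).foldl (fun st i => shiftCell st (i, ce)) ((PySem.List.pyRange cs (ce + 1) 1).foldl (fun st j => shiftCell st (rs, j)) (m, matGet m (rs + 1) cs))) col re cs (ce - 1)).1 row (rs + 1) (bottomA ((PySem.List.pyRange (rs + 1) (re + 1) 1).foldl (fun st i => shiftCell st (i, ce)) ((PySem.List.pyRange cs (ce + 1) 1).foldl (fun st j => shiftCell st (rs, j)) (m, matGet m (rs + 1) cs))) col re cs (ce - 1)).2 cs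
  omega

def rotate_matrix_by_1 (mat : List (List Int)) (row : Int) (col : Int) : List (List Int) :=
  rotA_loop mat row col 0 (row - 1) 0 (col - 1)

-- ===== PORT B =====
-- the ring coordinates of one layer, clockwise from the top-left corner
def ringCoords (rs re cs ce : Int) : List (Int × Int) :=
  ((PySem.List.pyRange cs (ce + 1) 1).map fun j => (rs, j))
  ++ ((PySem.List.pyRange (rs + 1) (re + 1) 1).map fun i => (i, ce))
  ++ ((PySem.List.pyRange (ce - 1) (cs - 1) (-1)).map fun j => (re, j))
  ++ ((PySem.List.pyRange (re - 1) rs (-1)).map fun i => (i, cs))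

def rotB_loop (m : List (List Int)) (rs re cs ce : Int) : List (List Int) :=
  if rs < re ∧ cs < ce then
    let coords := ringCoords rs re cs ce
    let vals := coords.map fun p => matGet m p.1 p.2
    -- python: vals = [vals[-1]] + vals[:-1]
    let vals2 := PySem.List.pyGetD vals (-1) 0 :: PySem.List.slice vals none (some (-1))
    let m2 := (coords.zip vals2).foldl (fun mm pv => matSet mm pv.1.1 pv.1.2 pv.2) m
    rotB_loop m2 (rs + 1) (re - 1) (cs + 1) (ce - 1)
  else m
termination_by (ce - cs).toNat
decreasing_by omega

def rotate_matrix_by_1_alt (mat : List (List Int)) (row : Int) (col : Int) : List (List Int) :=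
  rotB_loop mat 0 (row - 1) 0 (col - 1)

-- ===== PRECONDITION & SPEC =====
-- Pre_ excludes exactly the inputs on which the Python A raises IndexError: when row ≥ 2
-- and col ≥ 2 the loop runs and A indexes rows 0..row-1 and columns 0..col-1, so mat must
-- have at least row rows whose first row rows each have at least col entries; otherwise A
-- never indexes mat and returns it unchanged.  (The Lean ports are total, so the proof
-- below does not need Pre_; it is here to delimit the Python-raising inputs.)
def Pre_rotate_matrix_by_1 (mat : List (List Int)) (row : Int) (col : Int) : Prop :=
  2 ≤ row → 2 ≤ col →
    (row ≤ (mat.length : Int) ∧ ∀ r ∈ mat.take row.toNat, col ≤ (r.length : Int))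
instance (mat : List (List Int)) (row : Int) (col : Int) : Decidable (Pre_rotate_matrix_by_1 mat row col) := by unfold Pre_rotate_matrix_by_1; infer_instance

def pvWitness_rotate_matrix_by_1 : List (List Int) × Int × Int := ([[1, 2], [3, 4]], 2, 2)

def Spec_rotate_matrix_by_1 (mat : List (List Int)) (row : Int) (col : Int) (out : List (List Int)) : Prop := out = rotate_matrix_by_1_alt mat row col
instance (mat : List (List Int)) (row : Int) (col : Int) (out : List (List Int)) : Decidable (Spec_rotate_matrix_by_1 mat row col out) := by unfold Spec_rotate_matrix_by_1; infer_instance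

-- ===== CLAIM (what is proved, stated in full; the proofs are below) =====
def Claim_equal_rotate_matrix_by_1 : Prop := ∀ (mat : List (List Int)) (row : Int) (col : Int), Dom_rotate_matrix_by_1 mat row col → Pre_rotate_matrix_by_1 mat row col → Spec_rotate_matrix_by_1 mat row col (rotate_matrix_by_1 mat row col)

-- ===== LEMMAS AND PROOFS =====

-- zip ignores the part of the second list beyond the first list's length
theorem pv_zip_append {α β : Type} (xs : List α) (ys zs : List β) (h : xs.length ≤ ys.length) :
    xs.zip (ys ++ zs) = xs.zip ys := by
  induction xs generalizing ys with
  | nil => simp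
  | cons x xs ih =>
    cases ys with
    | nil => simp at h
    | cons y ys =>
      simp only [List.cons_append, List.zip_cons_cons, List.cons.injEq, true_and]
      exact ih ys (by simpa using h)

theorem matGet_nonneg (m : List (List Int)) (i j : Int) (hi : 0 ≤ i) (hj : 0 ≤ j) :
    matGet m i j = ((m.getD i.toNat []).getD j.toNat 0) := by
  unfold matGet
  rw [PySem.List.pyGetD_of_nonneg _ _ hi, PySem.List.pyGetD_of_nonneg _ _ hj]

theorem matSet_nonneg (m : List (List Int)) (i j v : Int) (hi : 0 ≤ i) (hj : 0 ≤ j) :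
    matSet m i j v = m.set i.toNat ((m.getD i.toNat []).set j.toNat v) := by
  unfold matSet
  rw [PySem.List.pyGetD_of_nonneg _ _ hi, PySem.List.pySetD_of_nonneg _ _ hj,
    PySem.List.pySetD_of_nonneg _ _ hi]

-- a write at one (nonneg) cell does not change a read at a different (nonneg) cell
theorem matGet_matSet_ne (m : List (List Int)) (i j i' j' v : Int)
    (hi : 0 ≤ i) (hj : 0 ≤ j) (hi' : 0 ≤ i') (hj' : 0 ≤ j') (hne : (i, j) ≠ (i', j')) :
    matGet (matSet m i j v) i' j' = matGet m i' j' := by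
  rw [matSet_nonneg _ _ _ _ hi hj, matGet_nonneg _ _ _ hi' hj', matGet_nonneg _ _ _ hi' hj']
  simp only [List.getD_eq_getElem?_getD]
  by_cases hii : i = i'
  · subst hii
    have hjj : j.toNat ≠ j'.toNat := by
      intro hc; exact hne (by rw [Prod.mk.injEq]; omega)
    by_cases hlen : i.toNat < m.length
    · rw [List.getElem?_set_self hlen]
      simp only [Option.getD_some]
      rw [List.getElem?_set_ne hjj]
    · rw [List.set_eq_of_length_le (by omega)]
  · rw [List.getElem?_set_ne (by omega)]

-- A's shifting pass over distinct nonneg cells writes, at each cell, the PREVIOUS cell's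
-- original value (the first cell gets the seed `prev`): it equals one write-back pass.
theorem shift_eq_writes (ps : List (Int × Int)) (m : List (List Int)) (prev : Int)
    (hnn : ∀ p ∈ ps, 0 ≤ p.1 ∧ 0 ≤ p.2) (hnd : ps.Nodup) :
    (ps.foldl shiftCell (m, prev)).1
      = (ps.zip (prev :: ps.map fun p => matGet m p.1 p.2)).foldl
          (fun mm pv => matSet mm pv.1.1 pv.1.2 pv.2) m := by
  induction ps generalizing m prev with
  | nil => simp
  | cons p ps ih =>
    have hp := hnn p (List.mem_cons_self ..)
    have hps : ∀ q ∈ ps, 0 ≤ q.1 ∧ 0 ≤ q.2 := fun q hq => hnn q (List.mem_cons_of_mem _ hq)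
    have hpnot : p ∉ ps := (List.nodup_cons.mp hnd).1
    have hqp : ∀ q ∈ ps, (p.1, p.2) ≠ (q.1, q.2) := by
      intro q hq hc
      apply hpnot
      have hpq : p = q := by
        obtain ⟨a, b⟩ := p; obtain ⟨c, d⟩ := q; simpa using hc
      rwa [hpq]
    have hmap : (ps.map fun q => matGet (matSet m p.1 p.2 prev) q.1 q.2)
        = ps.map fun q => matGet m q.1 q.2 := by
      apply List.map_congr_left
      intro q hq
      exact matGet_matSet_ne m p.1 p.2 q.1 q.2 prev hp.1 hp.2 (hps q hq).1 (hps q hq).2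
        (hqp q hq)
    calc ((p :: ps).foldl shiftCell (m, prev)).1
        = (ps.foldl shiftCell (matSet m p.1 p.2 prev, matGet m p.1 p.2)).1 := by
          simp [List.foldl_cons, shiftCell]
      _ = (ps.zip (matGet m p.1 p.2 ::
            ps.map fun q => matGet (matSet m p.1 p.2 prev) q.1 q.2)).foldl
            (fun mm pv => matSet mm pv.1.1 pv.1.2 pv.2) (matSet m p.1 p.2 prev) := by
          exact ih (matSet m p.1 p.2 prev) (matGet m p.1 p.2) hps (List.nodup_cons.mp hnd).2
      _ = _ := by rw [hmap]; simp [List.zip_cons_cons, List.foldl_cons]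

theorem ringCoords_nonneg (rs re cs ce : Int) (h0 : 0 ≤ rs) (h1 : 0 ≤ cs)
    (hr : rs < re) (hc : cs < ce) :
    ∀ p ∈ ringCoords rs re cs ce, 0 ≤ p.1 ∧ 0 ≤ p.2 := by
  intro p hp
  unfold ringCoords at hp
  simp only [List.mem_append, List.mem_map] at hp
  rcases hp with ((⟨j, hj, rfl⟩ | ⟨i, hi, rfl⟩) | ⟨j, hj, rfl⟩) | ⟨i, hi, rfl⟩
  · rw [PySem.List.mem_pyRange_one] at hj
    exact ⟨h0, show (0:Int) ≤ j by omega⟩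
  · rw [PySem.List.mem_pyRange_one] at hi
    exact ⟨show (0:Int) ≤ i by omega, show (0:Int) ≤ ce by omega⟩
  · rw [PySem.List.mem_pyRange_neg_one] at hj
    exact ⟨show (0:Int) ≤ re by omega, show (0:Int) ≤ j by omega⟩
  · rw [PySem.List.mem_pyRange_neg_one] at hi
    exact ⟨show (0:Int) ≤ i by omega, h1⟩

theorem ringCoords_nodup (rs re cs ce : Int) (hr : rs < re) (hc : cs < ce) :
    (ringCoords rs re cs ce).Nodup := by
  have h3 : (PySem.List.pyRange (ce - 1) (cs - 1) (-1)) = (PySem.List.pyRange cs ce 1).reverse := by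
    have h := PySem.List.pyRange_neg_one_eq_reverse (a := ce - 1) (b := cs - 1)
    simpa using h
  have h4 : (PySem.List.pyRange (re - 1) rs (-1)) = (PySem.List.pyRange (rs + 1) re 1).reverse := by
    have h := PySem.List.pyRange_neg_one_eq_reverse (a := re - 1) (b := rs)
    simpa using h
  unfold ringCoords
  rw [h3, h4]
  simp only [List.nodup_append, List.mem_append, List.mem_map,
    List.mem_reverse, PySem.List.mem_pyRange_one]
  refine ⟨⟨⟨?_, ?_, ?_⟩, ?_, ?_⟩, ?_, ?_⟩
  · exact List.Nodup.map (fun a b h => by simpa using h) (PySem.List.nodup_pyRange_one cs (ce + 1))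
  · exact List.Nodup.map (fun a b h => by simpa using h) (PySem.List.nodup_pyRange_one (rs + 1) (re + 1))
  · rintro a ⟨x, hx, rfl⟩ b ⟨y, hy, rfl⟩ heq
    rw [Prod.mk.injEq] at heq; omega
  · exact List.Nodup.map (fun a b h => by simpa using h)
      (by rw [List.nodup_reverse]; exact PySem.List.nodup_pyRange_one cs ce)
  · rintro a (⟨x, hx, rfl⟩ | ⟨x, hx, rfl⟩) b ⟨y, hy, rfl⟩ heq <;>
      (rw [Prod.mk.injEq] at heq; omega)
  · exact List.Nodup.map (fun a b h => by simpa using h)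
      (by rw [List.nodup_reverse]; exact PySem.List.nodup_pyRange_one (rs + 1) re)
  · rintro a ((⟨x, hx, rfl⟩ | ⟨x, hx, rfl⟩) | ⟨x, hx, rfl⟩) b ⟨y, hy, rfl⟩ heq <;>
      (rw [Prod.mk.injEq] at heq; omega)

-- the clockwise ring ends at the cell just below the top-left corner
theorem ringCoords_concat (rs re cs ce : Int) (hr : rs < re) (hc : cs < ce) :
    ∃ pre, ringCoords rs re cs ce = pre ++ [(rs + 1, cs)] := by
  unfold ringCoords
  by_cases h : rs + 1 < re
  · have h4 : PySem.List.pyRange (re - 1) rs (-1)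
        = ((PySem.List.pyRange (rs + 1 + 1) re 1).reverse) ++ [rs + 1] := by
      have e : PySem.List.pyRange (re - 1) rs (-1) = (PySem.List.pyRange (rs + 1) re 1).reverse := by
        have := PySem.List.pyRange_neg_one_eq_reverse (a := re - 1) (b := rs)
        simpa using this
      rw [e, PySem.List.pyRange_one_cons h, List.reverse_cons]
    exact ⟨((PySem.List.pyRange cs (ce + 1) 1).map fun j => (rs, j))
        ++ (((PySem.List.pyRange (rs + 1) (re + 1) 1).map fun i => (i, ce))
        ++ (((PySem.List.pyRange (ce - 1) (cs - 1) (-1)).map fun j => (re, j))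
        ++ ((PySem.List.pyRange (rs + 1 + 1) re 1).reverse.map fun i => (i, cs)))),
      by rw [h4]; simp [List.map_append, List.append_assoc]⟩
  · have hre : re = rs + 1 := by omega
    subst hre
    have h4 : PySem.List.pyRange (rs + 1 - 1) rs (-1) = [] :=
      PySem.List.pyRange_neg_one_eq_nil (by omega)
    have h3 : PySem.List.pyRange (ce - 1) (cs - 1) (-1)
        = ((PySem.List.pyRange (cs + 1) ce 1).reverse) ++ [cs] := by
      have e : PySem.List.pyRange (ce - 1) (cs - 1) (-1) = (PySem.List.pyRange cs ce 1).reverse := by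
        have := PySem.List.pyRange_neg_one_eq_reverse (a := ce - 1) (b := cs - 1)
        simpa using this
      rw [e, PySem.List.pyRange_one_cons hc, List.reverse_cons]
    exact ⟨((PySem.List.pyRange cs (ce + 1) 1).map fun j => (rs, j))
        ++ (((PySem.List.pyRange (rs + 1) (rs + 1 + 1) 1).map fun i => (i, ce))
        ++ ((PySem.List.pyRange (cs + 1) ce 1).reverse.map fun j => (rs + 1, j))),
      by rw [h3, h4]; simp [List.map_append, List.append_assoc]⟩

-- one layer of A (top, right, bottom, left shifting passes) equals one layer of B
-- (read the ring, rotate right by one, write it back)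
theorem layer_eq (m : List (List Int)) (rs re cs ce : Int) (h0 : 0 ≤ rs) (h1 : 0 ≤ cs)
    (hr : rs < re) (hc : cs < ce) :
    ((PySem.List.pyRange (re - 1) rs (-1)).foldl (fun st i => shiftCell st (i, cs))
      ((PySem.List.pyRange (ce - 1) (cs - 1) (-1)).foldl (fun st j => shiftCell st (re, j))
        ((PySem.List.pyRange (rs + 1) (re + 1) 1).foldl (fun st i => shiftCell st (i, ce))
          ((PySem.List.pyRange cs (ce + 1) 1).foldl (fun st j => shiftCell st (rs, j))
            (m, matGet m (rs + 1) cs))))).1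
    = ((ringCoords rs re cs ce).zip
        (PySem.List.pyGetD ((ringCoords rs re cs ce).map fun p => matGet m p.1 p.2) (-1) 0 ::
          PySem.List.slice ((ringCoords rs re cs ce).map fun p => matGet m p.1 p.2) none
            (some (-1)))).foldl (fun mm pv => matSet mm pv.1.1 pv.1.2 pv.2) m := by
  have hfold : (ringCoords rs re cs ce).foldl shiftCell (m, matGet m (rs + 1) cs)
      = (PySem.List.pyRange (re - 1) rs (-1)).foldl (fun st i => shiftCell st (i, cs))
        ((PySem.List.pyRange (ce - 1) (cs - 1) (-1)).foldl (fun st j => shiftCell st (re, j))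
          ((PySem.List.pyRange (rs + 1) (re + 1) 1).foldl (fun st i => shiftCell st (i, ce))
            ((PySem.List.pyRange cs (ce + 1) 1).foldl (fun st j => shiftCell st (rs, j))
              (m, matGet m (rs + 1) cs)))) := by
    unfold ringCoords
    simp only [List.foldl_append, List.foldl_map]
  rw [← hfold,
    shift_eq_writes _ m _ (ringCoords_nonneg rs re cs ce h0 h1 hr hc)
      (ringCoords_nodup rs re cs ce hr hc)]
  obtain ⟨pre, hpre⟩ := ringCoords_concat rs re cs ce hr hc
  have hvals : ((ringCoords rs re cs ce).map fun p => matGet m p.1 p.2)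
      = (pre.map fun p => matGet m p.1 p.2) ++ [matGet m (rs + 1) cs] := by
    rw [hpre]; simp
  have hlast : PySem.List.pyGetD ((ringCoords rs re cs ce).map fun p => matGet m p.1 p.2) (-1) 0
      = matGet m (rs + 1) cs := by
    rw [hvals]; simp [PySem.List.pyGetD_neg_one_append_singleton]
  have hdrop : PySem.List.slice ((ringCoords rs re cs ce).map fun p => matGet m p.1 p.2) none
      (some (-1)) = pre.map fun p => matGet m p.1 p.2 := by
    rw [hvals, PySem.List.slice_to_neg_one]; simp
  rw [hlast, hdrop]
  have hsplit : matGet m (rs + 1) cs :: ((ringCoords rs re cs ce).map fun p => matGet m p.1 p.2)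
      = (matGet m (rs + 1) cs :: pre.map fun p => matGet m p.1 p.2) ++ [matGet m (rs + 1) cs] := by
    rw [hvals]; simp
  rw [hsplit, pv_zip_append _ _ _ (by rw [hpre]; simp)]

theorem main_lemma : ∀ (m : List (List Int)) (row col rs re cs ce : Int),
    0 ≤ rs → 0 ≤ cs → 1 < row → 1 < col →
    rotA_loop m row col rs re cs ce = rotB_loop m rs re cs ce := by
  have aux : ∀ (n : Nat) (m : List (List Int)) (row col rs re cs ce : Int),
      (ce - cs).toNat ≤ n → 0 ≤ rs → 0 ≤ cs → 1 < row → 1 < col →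
      rotA_loop m row col rs re cs ce = rotB_loop m rs re cs ce := by
    intro n
    induction n with
    | zero =>
      intro m row col rs re cs ce hn h0 h1 hrow hcol
      rw [rotA_loop, rotB_loop]
      have h : ¬ (rs < re ∧ cs < ce) := by omega
      rw [dif_neg h, if_neg h]
    | succ n ih =>
      intro m row col rs re cs ce hn h0 h1 hrow hcol
      by_cases h : rs < re ∧ cs < ce
      · rw [rotA_loop, rotB_loop, dif_pos h, if_pos h]
        simp only [bottomA, leftA, if_pos hcol, if_pos hrow]
        rw [show rs + 1 - 1 = rs from by ring, layer_eq m rs re cs ce h0 h1 h.1 h.2]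
        exact ih _ row col (rs + 1) (re - 1) (cs + 1) (ce - 1) (by omega) (by omega) (by omega)
          hrow hcol
      · rw [rotA_loop, rotB_loop, dif_neg h, if_neg h]
  intro m row col rs re cs ce
  exact aux (ce - cs).toNat m row col rs re cs ce le_rfl

-- ===== VERDICT (by name: the statement is the Claim_ definition above) =====
theorem rotate_matrix_by_1_spec : Claim_equal_rotate_matrix_by_1 := by
  intro mat row col _ _
  unfold Spec_rotate_matrix_by_1 rotate_matrix_by_1 rotate_matrix_by_1_alt
  by_cases h : 1 < row ∧ 1 < col
  · exact main_lemma mat row col 0 (row - 1) 0 (col - 1) le_rfl le_rfl h.1 h.2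
  · rw [rotA_loop, rotB_loop]
    have h' : ¬ (0 < row - 1 ∧ 0 < col - 1) := by omega
    rw [dif_neg h', if_neg h']
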